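-- pv_equiv track=rewrite | github.com/Elfix3123/CoursBUTINFO | S3/R3.09/TD1.py | chiffrerPermutations
-- ===== SOURCE A (Python) =====
-- def chiffrerPermutations(msg: str,  key: dict) -> str:
-- 	keysize = len( key)
-- 	result = ""
-- 	msgsize = (len(msg)//keysize+1)*keysize
--
-- 	while len(msg) < msgsize:
-- 		msg+=" "
--
-- 	i = 0
-- 	while i < msgsize:
-- 		index =  key[i%keysize+1] + (i//keysize)*keysize - 1
-- 		if index > len(msg) - 1:
-- 			result += " "
-- 		else:
-- 			result += msg[index]
-- 		i+=1
-- 	return result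
-- ===== SOURCE B (Python) =====
-- def chiffrerPermutations(msg: str, key: dict) -> str:
--     k = len(key)
--     nb = len(msg) // k + 1
--     padded = msg.ljust(nb * k)
--     # build one column per key position, then transpose with zip and flatten
--     cols = ["".join(padded[key[p] - 1 + j * k] if key[p] - 1 + j * k < len(padded) else " "
--                     for j in range(nb))
--             for p in range(1, k + 1)]
--     return "".join(map("".join, zip(*cols)))
-- ===== Notes on version B (the rewrite author's own statement) =====
-- stated objective: alternative
-- what changed: B pads arithmetically with ljust, builds one ciphertext column per key position (one dict lookup per column) and then transposes the columns with zip and joins, instead of A's flat character-by-character while-loop with per-character modulo/division arithmetic and repeated string concatenation.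
import Mathlib
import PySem

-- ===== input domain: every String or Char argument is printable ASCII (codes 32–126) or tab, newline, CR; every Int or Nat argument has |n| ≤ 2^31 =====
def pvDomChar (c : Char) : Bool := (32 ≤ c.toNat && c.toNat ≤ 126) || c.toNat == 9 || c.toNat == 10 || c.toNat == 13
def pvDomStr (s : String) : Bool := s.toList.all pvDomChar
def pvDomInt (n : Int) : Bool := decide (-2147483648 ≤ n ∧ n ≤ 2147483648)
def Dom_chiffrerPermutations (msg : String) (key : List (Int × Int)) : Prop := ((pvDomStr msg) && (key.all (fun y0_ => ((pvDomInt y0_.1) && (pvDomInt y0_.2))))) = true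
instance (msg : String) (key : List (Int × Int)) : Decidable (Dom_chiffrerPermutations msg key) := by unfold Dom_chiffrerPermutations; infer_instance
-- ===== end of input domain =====

-- B builds the ciphertext column-by-column (one column per key position) and transposes with
-- zip, instead of A's flat character-by-character while-loop; objective: alternative structure.

-- ===== PORT A =====
-- while len(msg) < msgsize: msg += " "
def padA (m : List Char) (msgsize : Int) : List Char :=
  if (m.length : Int) < msgsize then padA (m ++ [' ']) msgsize else m
termination_by (msgsize - m.length).toNat
decreasing_by simp at *; omega

-- the main while loop over i; result accumulator; dict lookup via getD (Pre_ guarantees the key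
-- is present and the index is ≥ -len, exactly where Python would not raise)
def loopA (d : PySem.Dict Int Int) (keysize : Int) (m : List Char) (msgsize : Int)
    (i : Int) (result : List Char) : List Char :=
  if i < msgsize then
    let index := d.getD (PySem.Int.mod i keysize + 1) 0 + PySem.Int.floordiv i keysize * keysize - 1
    let result := if index > (m.length : Int) - 1 then result ++ [' ']
                  else result ++ [PySem.List.pyGetD m index ' ']
    loopA d keysize m msgsize (i + 1) result
  else result
termination_by (msgsize - i).toNat
decreasing_by omega

def chiffrerPermutations (msg : String) (key : List (Int × Int)) : String :=
  let d : PySem.Dict Int Int := PySem.Dict.mk key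
  let keysize : Int := key.length
  let m := msg.toList
  let msgsize : Int := (PySem.Int.floordiv (m.length : Int) keysize + 1) * keysize
  let m2 := padA m msgsize
  String.mk (loopA d keysize m2 msgsize 0 [])

-- ===== PORT B =====
-- zip(*cols): repeatedly take the heads of all the columns (stops when a column runs out)
def zipStar (cs : List (List Char)) : List (List Char) :=
  match cs with
  | [] => []
  | c :: rest =>
    if h : ((c :: rest).all (fun l => !l.isEmpty)) then
      (c :: rest).map (fun l => l.headD ' ') :: zipStar ((c :: rest).map (fun l => l.tail))
    else []
termination_by (cs.headD []).length
decreasing_by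
  simp only [List.all_cons, Bool.and_eq_true, Bool.not_eq_true', List.isEmpty_eq_false_iff] at h
  have hpos : 0 < c.length := List.length_pos_of_ne_nil h.1
  simp only [List.map_cons, List.headD_cons, List.length_tail]
  omega

def chiffrerPermutations_alt (msg : String) (key : List (Int × Int)) : String :=
  let d : PySem.Dict Int Int := PySem.Dict.mk key
  let k : Int := key.length
  let m := msg.toList
  let nb : Int := PySem.Int.floordiv (m.length : Int) k + 1
  let padded := m ++ List.replicate (nb * k - m.length).toNat ' '   -- msg.ljust(nb*k)
  let cols := (PySem.List.pyRange 1 (k + 1) 1).map (fun p =>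
    (PySem.List.pyRange 0 nb 1).map (fun j =>
      if d.getD p 0 - 1 + j * k < (padded.length : Int)
      then PySem.List.pyGetD padded (d.getD p 0 - 1 + j * k) ' ' else ' '))
  String.mk (zipStar cols).flatten

-- ===== PRECONDITION & SPEC =====
-- Exactly the inputs where the Python A returns: keysize > 0 (else ZeroDivisionError), every
-- position 1..keysize is a key of the dict (else KeyError), and every mapped value is ≥ 1 - msgsize
-- (else the j = 0 index is below -len(msg) and msg[index] raises IndexError).
def Pre_chiffrerPermutations (msg : String) (key : List (Int × Int)) : Prop :=
  0 < key.length ∧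
  ∀ p ∈ PySem.List.pyRange 1 ((key.length : Int) + 1) 1,
    (PySem.Dict.mk key).contains p = true ∧
    1 - (PySem.Int.floordiv (msg.toList.length : Int) key.length + 1) * key.length
      ≤ (PySem.Dict.mk key).getD p 0
instance (msg : String) (key : List (Int × Int)) : Decidable (Pre_chiffrerPermutations msg key) := by
  unfold Pre_chiffrerPermutations; infer_instance

def pvWitness_chiffrerPermutations : String × (List (Int × Int)) := ("abc", [(1, 2), (2, 1)])

def Spec_chiffrerPermutations (msg : String) (key : List (Int × Int)) (out : String) : Prop :=
  out = chiffrerPermutations_alt msg key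
instance (msg : String) (key : List (Int × Int)) (out : String) :
    Decidable (Spec_chiffrerPermutations msg key out) := by
  unfold Spec_chiffrerPermutations; infer_instance

-- ===== CLAIM (what is proved, stated in full; the proofs are below) =====
def Claim_equal_chiffrerPermutations : Prop :=
  ∀ (msg : String) (key : List (Int × Int)), Dom_chiffrerPermutations msg key →
    Pre_chiffrerPermutations msg key →
    Spec_chiffrerPermutations msg key (chiffrerPermutations msg key)

-- ===== LEMMAS AND PROOFS =====

-- A's character at flat position i, seen as a function of (key position p, block j)
def gFun (d : PySem.Dict Int Int) (m : List Char) (k : Int) (p j : Int) : Char :=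
  if d.getD p 0 + j * k - 1 > (m.length : Int) - 1 then ' '
  else PySem.List.pyGetD m (d.getD p 0 + j * k - 1) ' '

lemma padA_eq (m : List Char) (s : Int) :
    padA m s = m ++ List.replicate (s - m.length).toNat ' ' := by
  by_cases h : (m.length : Int) < s
  · rw [padA, if_pos h, padA_eq (m ++ [' ']) s]
    have h1 : (s - ((m ++ [' ']).length : Int)).toNat + 1 = (s - m.length).toNat := by
      simp; omega
    rw [← h1, List.replicate_succ, List.append_assoc]
    rfl
  · rw [padA, if_neg h]
    have : (s - (m.length : Int)).toNat = 0 := by omega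
    simp [this]
termination_by (s - m.length).toNat
decreasing_by simp at *; omega

lemma loopA_eq (d : PySem.Dict Int Int) (k : Int) (m : List Char) (L i : Int)
    (acc : List Char) :
    loopA d k m L i acc =
      acc ++ (PySem.List.pyRange i L 1).map
        (fun i => gFun d m k (PySem.Int.mod i k + 1) (PySem.Int.floordiv i k)) := by
  by_cases h : i < L
  · rw [loopA, if_pos h, loopA_eq, PySem.List.pyRange_one_cons h]
    simp only [List.map_cons, gFun]
    split_ifs <;> simp
  · rw [loopA, if_neg h, PySem.List.pyRange_one_eq_nil (by omega)]
    simp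
termination_by (L - i).toNat
decreasing_by omega

lemma zipStar_map_map (g : Int → Int → Char) (J P : List Int) (hP : P ≠ []) :
    zipStar (P.map (fun p => J.map (g p))) =
      J.map (fun j => P.map (fun p => g p j)) := by
  induction J generalizing P with
  | nil =>
    obtain ⟨q, P', rfl⟩ := List.exists_cons_of_ne_nil hP
    rw [zipStar.eq_def]
    simp
  | cons j J' ih =>
    obtain ⟨q, P', rfl⟩ := List.exists_cons_of_ne_nil hP
    rw [zipStar.eq_def]
    simp only [List.map_cons, List.map_map]
    rw [dif_pos (by simp [List.all_eq_true])]
    simp only [List.headD_cons, List.tail_cons, Function.comp_def]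
    congr 1
    exact ih (q :: P') (by simp)

-- splitting the flat range 0..nb*k into nb blocks of k
lemma blocks_eq (G : Int → Int → Char) (k : Int) (hk : 0 < k) (n : Nat) :
    (PySem.List.pyRange 0 ((n : Int) * k) 1).map
        (fun i => G (PySem.Int.mod i k + 1) (PySem.Int.floordiv i k)) =
      (PySem.List.pyRange 0 (n : Int) 1).flatMap
        (fun j => (PySem.List.pyRange 1 (k + 1) 1).map (fun p => G p j)) := by
  induction n with
  | zero => simp [PySem.List.pyRange_one_eq_nil]
  | succ n ih =>
    have hnk : (0:Int) ≤ (n : Int) * k := by positivity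
    have hsplit := PySem.List.pyRange_one_append 0 ((n : Int) * k) (((n : Int) + 1) * k)
      hnk (by nlinarith)
    push_cast
    rw [hsplit, List.map_append, ih,
        PySem.List.pyRange_one_succ_right (a := 0) (b := (n : Int)) (by positivity),
        List.flatMap_append]
    congr 1
    rw [PySem.List.pyRange_one (((n:Int) * k)) (((n:Int)+1) * k),
        PySem.List.pyRange_one 1 (k + 1)]
    have hlen : (((n:Int)+1) * k - (n:Int) * k).toNat = (k + 1 - 1).toNat := by
      have : ((n:Int)+1) * k - (n:Int) * k = k := by ring
      rw [this]; omega
    rw [hlen]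
    simp only [List.map_map, List.flatMap_cons, List.flatMap_nil, List.append_nil]
    apply List.map_congr_left
    intro t ht
    simp only [List.mem_range] at ht
    have htk : (t : Int) < k := by omega
    have hrw : (n:Int) * k + (t:Int) = (t:Int) + k * (n:Int) := by ring
    have hmod : PySem.Int.mod ((n:Int) * k + (t:Int)) k = (t : Int) := by
      rw [PySem.Int.mod_eq_emod_of_pos hk, hrw, Int.add_mul_emod_self_left,
        Int.emod_eq_of_lt (by positivity) htk]
    have hdiv : PySem.Int.floordiv ((n:Int) * k + (t:Int)) k = (n : Int) := by
      rw [PySem.Int.floordiv_eq_ediv_of_pos hk, hrw,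
        Int.add_mul_ediv_left _ _ (by omega), Int.ediv_eq_zero_of_lt (by positivity) htk]
      ring
    simp only [Function.comp_apply, hmod, hdiv]
    congr 1
    omega

lemma pyRange_one_ne_nil (a b : Int) (h : a < b) : PySem.List.pyRange a b 1 ≠ [] := by
  rw [PySem.List.pyRange_one_cons h]; simp

-- ===== VERDICT (by name: the statement is the Claim_ definition above) =====
theorem chiffrerPermutations_spec : Claim_equal_chiffrerPermutations := by
  intro msg key _ hpre
  obtain ⟨hk, -⟩ := hpre
  unfold Spec_chiffrerPermutations chiffrerPermutations chiffrerPermutations_alt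
  simp only [padA_eq, loopA_eq, List.nil_append]
  set k : Int := (key.length : Int) with hkdef
  have hkpos : (0:Int) < k := by rw [hkdef]; exact_mod_cast hk
  set nb : Int := PySem.Int.floordiv (msg.toList.length : Int) k + 1 with hnb
  have hnbpos : 0 < nb := by
    rw [hnb, PySem.Int.floordiv_eq_ediv_of_pos hkpos]
    have : 0 ≤ (msg.toList.length : Int) / k := Int.ediv_nonneg (by positivity) (le_of_lt hkpos)
    omega
  set padded := msg.toList ++ List.replicate (nb * k - (msg.toList.length : Int)).toNat ' '
    with hpad
  set d : PySem.Dict Int Int := PySem.Dict.mk key with hd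
  have hPne : PySem.List.pyRange 1 (k + 1) 1 ≠ [] := pyRange_one_ne_nil 1 (k + 1) (by omega)
  rw [zipStar_map_map
      (fun p j => if d.getD p 0 - 1 + j * k < (padded.length : Int)
        then PySem.List.pyGetD padded (d.getD p 0 - 1 + j * k) ' ' else ' ')
      (PySem.List.pyRange 0 nb 1) (PySem.List.pyRange 1 (k + 1) 1) hPne]
  have hcols : ∀ p j : Int,
      (if d.getD p 0 - 1 + j * k < (padded.length : Int)
       then PySem.List.pyGetD padded (d.getD p 0 - 1 + j * k) ' ' else ' ')
      = gFun d padded k p j := by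
    intro p j
    have harith : d.getD p 0 - 1 + j * k = d.getD p 0 + j * k - 1 := by ring
    rw [harith, gFun]
    split_ifs with h1 h2 <;> first | rfl | omega
  simp only [hcols]
  have hnbn : ((nb.toNat : Nat) : Int) = nb := by omega
  have hblocks := blocks_eq (gFun d padded k) k hkpos nb.toNat
  rw [hnbn] at hblocks
  rw [hblocks, List.flatMap_def]
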